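-- pv_equiv track=rewrite | github.com/YUJIN-1221/-study-CodingTest | 프로그래머스/lv2/12973. 짝지어 제거하기/짝지어 제거하기.py | solution
-- ===== SOURCE A (Python) =====
-- def solution(s):
--     stack = []
--     for i in range(len(s)):
--         if stack == []:
--             stack.append(s[i])
--         else:
--             if stack[-1] == s[i]:
--                 stack.pop(-1)
--             else:
--                 stack.append(s[i])
--     return int(stack == [])
-- ===== SOURCE B (Python) =====
-- def solution(s):
--     t = list(s)
--     while True:
--         found = -1
--         for i in range(len(t) - 1):
--             if t[i] == t[i + 1]:
--                 found = i
--                 break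
--         if found < 0:
--             return int(len(t) == 0)
--         t = t[:found] + t[found + 2:]
-- ===== Notes on version B (the rewrite author's own statement) =====
-- stated objective: alternative
-- what changed: Replaces the single-pass stack fold with a fixpoint loop that repeatedly scans for the first adjacent equal pair, deletes it, and rescans until no pair remains, then tests emptiness.
import Mathlib
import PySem

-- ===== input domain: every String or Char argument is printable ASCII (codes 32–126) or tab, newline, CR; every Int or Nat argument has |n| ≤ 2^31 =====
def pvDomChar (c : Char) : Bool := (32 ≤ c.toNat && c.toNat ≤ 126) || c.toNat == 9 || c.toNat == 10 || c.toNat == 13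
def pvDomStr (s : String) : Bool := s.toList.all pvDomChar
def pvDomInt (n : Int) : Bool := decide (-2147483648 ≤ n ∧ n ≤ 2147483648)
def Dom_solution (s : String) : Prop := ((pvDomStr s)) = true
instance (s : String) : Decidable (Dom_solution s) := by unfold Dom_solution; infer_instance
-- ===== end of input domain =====

-- B replaces A's one-pass stack fold by a fixpoint loop removing the first adjacent equal pair until none remains; alternative decomposition, not faster.

-- ===== PORT A =====
-- The Python stack grows at the tail; we keep it top-first (head = stack[-1],
-- cons = append, tail = pop(-1)); only emptiness of the final stack is returned.
def solutionStep (stack : List Char) (c : Char) : List Char :=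
  if stack = [] then c :: stack
  else if stack.head? = some c then stack.tail
  else c :: stack

def solution (s : String) : Int :=
  let stack := s.toList.foldl solutionStep []
  if stack = [] then 1 else 0

-- ===== PORT B =====
-- first index i with t[i] = t[i+1], as in B's inner for-loop
def findPair : List Char → Option Nat
  | a :: b :: rest => if a = b then some 0 else (findPair (b :: rest)).map (· + 1)
  | _ => none

-- used by reduceB's termination proof
theorem findPair_decomp : ∀ (t : List Char) (i : Nat), findPair t = some i →
    ∃ u c v, t = u ++ c :: c :: v ∧ u.length = i ∧ t.take i ++ t.drop (i + 2) = u ++ v := by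
  intro t
  induction t with
  | nil => intro i h; simp [findPair] at h
  | cons a t ih =>
    intro i h
    match t with
    | [] => simp [findPair] at h
    | b :: rest =>
      by_cases hab : a = b
      · simp only [findPair, if_pos hab, Option.some.injEq] at h
        subst h
        exact ⟨[], a, rest, by simp [hab], rfl, by simp⟩
      · simp only [findPair, if_neg hab, Option.map_eq_some_iff] at h
        obtain ⟨j, hj, rfl⟩ := h
        obtain ⟨u, c, v, ht, hu, he⟩ := ih j hj
        exact ⟨a :: u, c, v, by simp [ht], by simp [hu], by simpa using he⟩

-- B's outer while-loop: delete the first adjacent pair, rescan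
def reduceB (t : List Char) : List Char :=
  match h : findPair t with
  | none => t
  | some i => reduceB (t.take i ++ t.drop (i + 2))
termination_by t.length
decreasing_by
  obtain ⟨u, c, v, ht, hu, he⟩ := findPair_decomp t i h
  rw [he, ht]; simp

def solution_alt (s : String) : Int :=
  if reduceB s.toList = [] then 1 else 0

-- ===== PRECONDITION & SPEC =====
def Spec_solution (s : String) (out : Int) : Prop := out = solution_alt s
instance (s : String) (out : Int) : Decidable (Spec_solution s out) := by unfold Spec_solution; infer_instance

-- ===== CLAIM (what is proved, stated in full; the proofs are below) =====
def Claim_equal_solution : Prop := ∀ (s : String), Dom_solution s → Spec_solution s (solution s)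

-- ===== LEMMAS AND PROOFS =====

-- a stack produced by the fold never has two equal adjacent elements
def NoAdj (t : List Char) : Prop := List.IsChain (· ≠ ·) t

theorem noAdj_step (st : List Char) (c : Char) (h : NoAdj st) : NoAdj (solutionStep st c) := by
  match st with
  | [] => simp [solutionStep, NoAdj]
  | d :: st' =>
    by_cases hdc : d = c
    · simpa [solutionStep, hdc, NoAdj] using h.tail
    · have : solutionStep (d :: st') c = c :: d :: st' := by
        simp [solutionStep, hdc]
      rw [this]
      exact List.isChain_cons_cons.mpr ⟨fun hc => hdc hc.symm, h⟩

theorem noAdj_fold (t : List Char) (st : List Char) (h : NoAdj st) :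
    NoAdj (t.foldl solutionStep st) := by
  induction t generalizing st with
  | nil => exact h
  | cons c t ih => exact ih _ (noAdj_step st c h)

-- cancellation: on an irreducible stack, pushing c twice is the identity
theorem step_step (st : List Char) (c : Char) (h : NoAdj st) :
    solutionStep (solutionStep st c) c = st := by
  match st with
  | [] => simp [solutionStep]
  | d :: st' =>
    by_cases hdc : d = c
    · subst hdc
      match st' with
      | [] => simp [solutionStep]
      | e :: st'' =>
        have hde : d ≠ e := (List.isChain_cons_cons.mp h).1
        simp [solutionStep, Ne.symm hde]
    · have h1 : solutionStep (d :: st') c = c :: d :: st' := by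
        simp [solutionStep, hdc]
      rw [h1]
      simp [solutionStep]

theorem fold_pair (st : List Char) (c : Char) (v : List Char) (h : NoAdj st) :
    (c :: c :: v).foldl solutionStep st = v.foldl solutionStep st := by
  simp only [List.foldl_cons, step_step st c h]

-- removing a first adjacent pair does not change the fold result
theorem fold_remove (u v : List Char) (c : Char) :
    (u ++ c :: c :: v).foldl solutionStep [] = (u ++ v).foldl solutionStep [] := by
  rw [List.foldl_append, List.foldl_append]
  exact fold_pair _ c v (noAdj_fold u [] (List.isChain_nil))

theorem findPair_none_noAdj : ∀ (t : List Char), findPair t = none → NoAdj t := by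
  intro t
  induction t with
  | nil => intro _; exact List.isChain_nil
  | cons a t ih =>
    intro h
    match t with
    | [] => exact List.isChain_singleton a
    | b :: rest =>
      by_cases hab : a = b
      · simp [findPair, hab] at h
      · simp only [findPair, if_neg hab, Option.map_eq_none_iff] at h
        exact List.isChain_cons_cons.mpr ⟨hab, ih h⟩

-- an irreducible string folds to its own reverse
theorem fold_irred : ∀ (t st : List Char), NoAdj (st.reverse ++ t) →
    t.foldl solutionStep st = t.reverse ++ st := by
  intro t
  induction t with
  | nil => intro st _; simp
  | cons c t ih =>
    intro st h
    have hstep : solutionStep st c = c :: st := by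
      match st with
      | [] => simp [solutionStep]
      | d :: st' =>
        have hdc : d ≠ c := by
          have hj := (List.isChain_append.mp h).2.2
          have hd : (d :: st').reverse.getLast? = some d := by simp
          exact fun hc => (hj d hd c (by simp)) hc
        simp [solutionStep, hdc]
    rw [List.foldl_cons, hstep, ih (c :: st) (by simpa using h)]
    simp

theorem reduceB_findPair (t : List Char) : findPair (reduceB t) = none := by
  fun_induction reduceB t with
  | case1 t h => exact h
  | case2 t i h ih => exact ih

theorem fold_reduceB (t : List Char) :
    t.foldl solutionStep [] = (reduceB t).foldl solutionStep [] := by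
  fun_induction reduceB t with
  | case1 t h => rfl
  | case2 t i h ih =>
    rw [← ih]
    obtain ⟨u, c, v, ht, hu, he⟩ := findPair_decomp t i h
    rw [he, ht, fold_remove]

-- ===== VERDICT (by name: the statement is the Claim_ definition above) =====
theorem solution_spec : Claim_equal_solution := by
  intro s _
  unfold Spec_solution solution solution_alt
  have h2 := fold_irred (reduceB s.toList) []
    (by simpa using findPair_none_noAdj _ (reduceB_findPair s.toList))
  rw [fold_reduceB s.toList, h2]
  rcases h : reduceB s.toList with _ | ⟨c, t⟩ <;> simp
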